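-- pv_equiv track=rewrite | github.com/bhavna-sinha/Group-Assignment-search-algorithm | part1/solver16_v2.py | rows_column_generator
-- ===== SOURCE A (Python) =====
-- def rows_column_generator(state):
--     desired_state = sorted(state)
--     cordinates = []
--     col_changes = []
--     row_changes = []
--     for i in range(4):
--         for j in range(4):
--             cordinates.append((i,j))
--     for i in range(len(state)):
--         ind = desired_state.index(state[i])
--         cordinates_state = cordinates[i]
--         cordinates_desired_state = cordinates[ind]
--
--         col = cordinates_desired_state[0] - cordinates_state[0]
--         row = cordinates_desired_state[1] - cordinates_state[1]
--
--         if col == 3: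
--             col_changes.append(-1)
--         elif col == -3:
--             col_changes.append(1)
--         elif col == -2 or col == 2:
--             col_changes.append(2)
--         else:
--             col_changes.append(col)
--
--         if row == 3:
--             row_changes.append(-1)
--         elif row == -3:
--             row_changes.append(1)
--         elif row == -2 or row == 2:
--             row_changes.append(2)
--         else:
--             row_changes.append(row)
--
--
--     return row_changes, col_changes
-- ===== SOURCE B (Python) =====
-- def rows_column_generator(state):
--     # goal position of a tile = its rank: the number of strictly smaller tiles
--     # (equals sorted(state).index(tile), first occurrence for duplicates), so no
--     # sort and no inner .index scan; cell coordinates come from a divmod table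
--     # and the two if/elif ladders collapse to the closed-form wrap ((d+1)%4)-1.
--     cells = [divmod(k, 4) for k in range(16)]
--     row_changes = []
--     col_changes = []
--     for i, v in enumerate(state):
--         rank = sum(1 for x in state if x < v)
--         (goal_r, goal_c), (cur_r, cur_c) = cells[rank], cells[i]
--         row_changes.append((goal_c - cur_c + 1) % 4 - 1)
--         col_changes.append((goal_r - cur_r + 1) % 4 - 1)
--     return row_changes, col_changes
-- ===== Notes on version B (the rewrite author's own statement) =====
-- stated objective: alternative
-- what changed: B never sorts and never scans a sorted list with .index(): a tile's goal position is computed directly as its rank (the count of strictly smaller tiles, which equals sorted(state).index(tile) including first-occurrence tie-breaking for duplicates), cell coordinates come from one divmod table, and A's two eight-branch if/elif ladders collapse to the closed-form wrap ((d+1)%4)-1.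
import Mathlib
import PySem

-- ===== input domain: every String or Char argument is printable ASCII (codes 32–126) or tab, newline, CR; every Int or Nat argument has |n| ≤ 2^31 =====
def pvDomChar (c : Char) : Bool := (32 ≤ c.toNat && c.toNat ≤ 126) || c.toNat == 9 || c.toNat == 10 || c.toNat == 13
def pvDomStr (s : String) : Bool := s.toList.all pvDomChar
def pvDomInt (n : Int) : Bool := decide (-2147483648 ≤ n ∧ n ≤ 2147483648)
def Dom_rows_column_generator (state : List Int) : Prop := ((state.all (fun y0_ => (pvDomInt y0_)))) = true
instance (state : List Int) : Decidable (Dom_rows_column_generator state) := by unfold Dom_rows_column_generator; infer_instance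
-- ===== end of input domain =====

-- B computes each tile's goal position as its rank (count of strictly smaller tiles) instead of
-- sorting and scanning with .index(), and replaces the two if/elif ladders by ((d+1)%4)-1
-- (objective: alternative); return values proved equal on Pre_ (len(state) ≤ 16).

-- ===== PORT A =====
-- the 16-entry coordinate table A builds with its nested range(4) loops
def cordinatesA : List (Int × Int) :=
  (PySem.List.pyRange 0 4).foldl (fun acc i =>
    (PySem.List.pyRange 0 4).foldl (fun acc2 j => acc2 ++ [(i, j)]) acc) []

def rows_column_generator (state : List Int) : List Int × List Int :=
  let desired_state := PySem.List.sorted state (fun x => x) false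
  let res := (PySem.List.pyRange 0 (PySem.List.len state)).foldl
    (fun (acc : List Int × List Int) i =>
      -- .index() cannot fail here (state[i] is in sorted(state)); getD 0 is never used
      let ind : Nat := (PySem.List.index? desired_state (PySem.List.pyGetD state i 0)).getD 0
      -- cordinates[i] / cordinates[ind]: pyGetD's default only fires where Python raises IndexError (outside Pre_)
      let cordinates_state := PySem.List.pyGetD cordinatesA i (0, 0)
      let cordinates_desired_state := PySem.List.pyGetD cordinatesA (ind : Int) (0, 0)
      let col := cordinates_desired_state.1 - cordinates_state.1
      let row := cordinates_desired_state.2 - cordinates_state.2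
      let colv : Int := if col = 3 then -1 else if col = -3 then 1 else if col = -2 ∨ col = 2 then 2 else col
      let rowv : Int := if row = 3 then -1 else if row = -3 then 1 else if row = -2 ∨ row = 2 then 2 else row
      (acc.1 ++ [rowv], acc.2 ++ [colv])) ([], [])
  res

-- ===== PORT B =====
-- B's divmod cell table [divmod(k, 4) for k in range(16)]
def cellsB : List (Int × Int) :=
  (PySem.List.pyRange 0 16).map (fun k => (PySem.Int.floordiv k 4, PySem.Int.mod k 4))

def rows_column_generator_alt (state : List Int) : List Int × List Int :=
  (PySem.List.enumerate state).foldl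
    (fun (acc : List Int × List Int) p =>
      -- rank = sum(1 for x in state if x < v)
      let rank : Int := state.foldl (fun c x => if x < p.2 then c + 1 else c) 0
      -- cells[rank] / cells[i]: pyGetD's default only fires where Python raises IndexError (outside Pre_)
      let g := PySem.List.pyGetD cellsB rank (0, 0)
      let c := PySem.List.pyGetD cellsB p.1 (0, 0)
      (acc.1 ++ [PySem.Int.mod (g.2 - c.2 + 1) 4 - 1],
       acc.2 ++ [PySem.Int.mod (g.1 - c.1 + 1) 4 - 1])) ([], [])

-- ===== PRECONDITION & SPEC =====
-- Pre_ excludes lists longer than 16, on which both A and B raise IndexError (their 16-entry tables).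
def Pre_rows_column_generator (state : List Int) : Prop := state.length ≤ 16
instance (state : List Int) : Decidable (Pre_rows_column_generator state) := by
  unfold Pre_rows_column_generator; infer_instance

def pvWitness_rows_column_generator : List Int := [5, 2, 9, 0]

def Spec_rows_column_generator (state : List Int) (out : List Int × List Int) : Prop :=
  out = rows_column_generator_alt state
instance (state : List Int) (out : List Int × List Int) : Decidable (Spec_rows_column_generator state out) := by
  unfold Spec_rows_column_generator; infer_instance

-- ===== CLAIM (what is proved, stated in full; the proofs are below) =====
def Claim_equal_rows_column_generator : Prop := ∀ (state : List Int), Dom_rows_column_generator state → Pre_rows_column_generator state → Spec_rows_column_generator state (rows_column_generator state)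

-- ===== LEMMAS AND PROOFS =====

-- A's coordinate table lookup, in closed form, for indices 0..15
lemma cordinatesA_get (i : Int) (h0 : 0 ≤ i) (h1 : i < 16) :
    PySem.List.pyGetD cordinatesA i (0, 0) = (PySem.Int.floordiv i 4, PySem.Int.mod i 4) := by
  interval_cases i <;> decide

-- B's divmod table gives the same coordinates on indices 0..15
lemma cellsB_get (i : Int) (h0 : 0 ≤ i) (h1 : i < 16) :
    PySem.List.pyGetD cellsB i (0, 0) = (PySem.Int.floordiv i 4, PySem.Int.mod i 4) := by
  interval_cases i <;> decide

-- A's eight-branch ladder equals B's closed-form wrap on displacements in [-3, 3]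
lemma ladder_eq_wrap (d : Int) (h0 : -3 ≤ d) (h1 : d ≤ 3) :
    (if d = 3 then (-1 : Int) else if d = -3 then 1 else if d = -2 ∨ d = 2 then 2 else d)
      = PySem.Int.mod (d + 1) 4 - 1 := by
  interval_cases d <;> decide

lemma fdiv4_bounds (i : Int) (h0 : 0 ≤ i) (h1 : i < 16) :
    0 ≤ PySem.Int.floordiv i 4 ∧ PySem.Int.floordiv i 4 ≤ 3 := by
  rw [PySem.Int.floordiv_eq_ediv_of_pos (by norm_num)]
  omega

lemma mod4_bounds (i : Int) : 0 ≤ PySem.Int.mod i 4 ∧ PySem.Int.mod i 4 < 4 :=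
  ⟨PySem.Int.mod_nonneg i (by norm_num), PySem.Int.mod_lt i (by norm_num)⟩

-- in a nondecreasing list containing v, the first index of v is the number of elements < v
lemma index?_pairwise_eq_countP (s : List Int) (hp : s.Pairwise (· ≤ ·)) (v : Int) (hv : v ∈ s) :
    PySem.List.index? s v = some (s.countP (fun x => decide (x < v))) := by
  induction s with
  | nil => cases hv
  | cons h t ih =>
    rcases List.pairwise_cons.mp hp with ⟨hle, hpt⟩
    by_cases hhv : h = v
    · subst hhv
      have hz : t.countP (fun x => decide (x < h)) = 0 :=
        List.countP_eq_zero.2 (fun x hx => by simpa using not_lt.2 (hle x hx))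
      rw [PySem.List.index?_cons_self]
      simp [hz]
    · have hvt : v ∈ t := by cases hv with
        | head => exact absurd rfl hhv
        | tail _ h' => exact h'
      have hlt : h < v := lt_of_le_of_ne (hle v hvt) hhv
      rw [PySem.List.index?_cons_of_ne t hhv, ih hpt hvt]
      simp [hlt, Nat.add_comm]

-- sorted-index of an element equals its rank in the original list
lemma index?_sorted_eq_countP (l : List Int) (v : Int) (hv : v ∈ l) :
    PySem.List.index? (PySem.List.sorted l (fun x => x) false) v
      = some (l.countP (fun x => decide (x < v))) := by
  have hperm : (PySem.List.sorted l (fun x => x) false).Perm l := PySem.List.sorted_perm l _ _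
  rw [index?_pairwise_eq_countP _ (PySem.List.sorted_pairwise l (fun x => x)) v
        ((PySem.List.mem_sorted _ _ _ _).2 hv),
      hperm.countP_eq]

-- a fold appending to both components of a pair is a pair of maps
lemma foldl_two_append {α : Type} (F G : α → Int) (l : List α) (a b : List Int) :
    List.foldl (fun acc i => (acc.1 ++ [F i], acc.2 ++ [G i])) (a, b) l = (a ++ l.map F, b ++ l.map G) := by
  induction l generalizing a b with
  | nil => simp
  | cons x xs ih => simp [ih]

-- ===== VERDICT (by name: the statement is the Claim_ definition above) =====
theorem rows_column_generator_spec : Claim_equal_rows_column_generator := by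
  intro state _ hpre
  unfold Pre_rows_column_generator at hpre
  unfold Spec_rows_column_generator
  simp only [rows_column_generator, rows_column_generator_alt,
    PySem.List.enumerate_eq_map_pyRange state 0, List.map_map, foldl_two_append,
    List.nil_append, Prod.mk.injEq]
  constructor <;>
  · apply List.map_congr_left
    intro i hi
    rw [PySem.List.mem_pyRange_one] at hi
    simp only [PySem.List.len_eq] at hi
    obtain ⟨hi0, hi1⟩ := hi
    have hi16 : i < 16 := lt_of_lt_of_le hi1 (by exact_mod_cast hpre)
    -- state[i] is an element of state
    have hvmem : PySem.List.pyGetD state i 0 ∈ state := by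
      rw [PySem.List.pyGetD_eq_getElem state 0 hi0 (by exact_mod_cast hi1)]
      exact List.getElem_mem _
    -- A's sorted index = B's rank = k
    set k : Nat := state.countP (fun x => decide (x < PySem.List.pyGetD state i 0)) with hkdef
    have hk : PySem.List.index? (PySem.List.sorted state (fun x => x) false)
        (PySem.List.pyGetD state i 0) = some k := index?_sorted_eq_countP state _ hvmem
    have hrank : state.foldl
        (fun c x => if x < PySem.List.pyGetD state i 0 then c + 1 else c) (0 : Int) = (k : Int) := by
      rw [PySem.List.foldl_ite_add_one, hkdef]; simp
    have hk16 : (k : Int) < 16 := by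
      obtain ⟨hklt, -, -⟩ := PySem.List.getElem_of_index?_eq_some hk
      have hlen : (PySem.List.sorted state (fun x => x) false).length = state.length :=
        PySem.List.length_sorted _ _ _
      omega
    simp only [Function.comp_apply, hk, Option.getD_some, hrank]
    rw [cordinatesA_get i hi0 hi16, cordinatesA_get (k : Int) (by positivity) hk16,
        cellsB_get i hi0 hi16, cellsB_get (k : Int) (by positivity) hk16]
    dsimp only
    refine ladder_eq_wrap _ ?_ ?_ <;>
    · have := fdiv4_bounds i hi0 hi16
      have := fdiv4_bounds (k : Int) (by positivity) hk16
      have := mod4_bounds i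
      have := mod4_bounds (k : Int)
      omega
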